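-- pv_equiv track=rewrite | github.com/bruno-portfolio/agrobr | agrobr/comtrade/client.py | _chunk_period
-- ===== SOURCE A (Python) =====
-- _MAX_PERIOD_ITEMS = 12
--
-- def _chunk_period(period: str, freq: str) -> list[str]:
--     period = str(period).strip()
--
--     if "-" not in period:
--         return [period]
--
--     parts = period.split("-")
--     if len(parts) != 2:
--         return [period]
--
--     start_str, end_str = parts[0].strip(), parts[1].strip()
--
--     if not start_str.isdigit() or not end_str.isdigit():
--         return [period]
--
--     start_year = int(start_str)
--     end_year = int(end_str)
--
--     if start_year > end_year:
--         return [period]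
--
--     if freq.upper() == "M":
--         all_periods: list[str] = []
--         for y in range(start_year, end_year + 1):
--             for m in range(1, 13):
--                 all_periods.append(f"{y}{m:02d}")
--
--         chunks: list[str] = []
--         for i in range(0, len(all_periods), _MAX_PERIOD_ITEMS):
--             chunk = all_periods[i : i + _MAX_PERIOD_ITEMS]
--             chunks.append(",".join(chunk))
--         return chunks
--
--     all_years = [str(y) for y in range(start_year, end_year + 1)]
--     chunks = []
--     for i in range(0, len(all_years), _MAX_PERIOD_ITEMS):
--         chunk = all_years[i : i + _MAX_PERIOD_ITEMS]
--         chunks.append(",".join(chunk))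
--     return chunks
-- ===== SOURCE B (Python) =====
-- _MAX_PERIOD_ITEMS = 12
--
-- def _chunk_period(period: str, freq: str) -> list[str]:
--     period = str(period).strip()
--     if "-" not in period:
--         return [period]
--     parts = period.split("-")
--     if len(parts) != 2:
--         return [period]
--     start_str, end_str = parts[0].strip(), parts[1].strip()
--     if not start_str.isdigit() or not end_str.isdigit():
--         return [period]
--     start_year, end_year = int(start_str), int(end_str)
--     if start_year > end_year:
--         return [period]
--     if freq.upper() == "M":
--         # a chunk of 12 monthly periods is exactly one year: emit one chunk per year
--         return [",".join(f"{y}{m:02d}" for m in range(1, 13))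
--                 for y in range(start_year, end_year + 1)]
--     chunks = []
--     years = [str(y) for y in range(start_year, end_year + 1)]
--     while years:
--         chunks.append(",".join(years[:_MAX_PERIOD_ITEMS]))
--         years = years[_MAX_PERIOD_ITEMS:]
--     return chunks
-- ===== Notes on version B (the rewrite author's own statement) =====
-- stated objective: simpler
-- what changed: For freq 'M' B emits one comma-joined chunk per year directly instead of building a flat list of all YYYYMM periods and re-slicing it into groups of 12, and the year branch chunks by take/drop recursion instead of an index-stepping slice loop.
import Mathlib
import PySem

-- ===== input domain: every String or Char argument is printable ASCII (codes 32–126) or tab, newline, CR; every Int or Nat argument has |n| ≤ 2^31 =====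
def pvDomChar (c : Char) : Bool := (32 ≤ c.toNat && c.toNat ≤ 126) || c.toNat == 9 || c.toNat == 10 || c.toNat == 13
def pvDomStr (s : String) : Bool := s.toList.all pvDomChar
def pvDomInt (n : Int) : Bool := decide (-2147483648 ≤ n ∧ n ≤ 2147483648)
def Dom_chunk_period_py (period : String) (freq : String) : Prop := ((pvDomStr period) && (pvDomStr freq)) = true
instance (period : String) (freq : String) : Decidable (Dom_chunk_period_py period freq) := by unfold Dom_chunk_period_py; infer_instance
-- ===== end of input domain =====

-- B restructures A's monthly branch: instead of flattening all months and re-slicing into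
-- groups of 12, it emits one chunk per year directly, and chunks the year list by
-- take/drop recursion instead of index slices (objective: simpler).

-- ===== PORT A =====
-- f"{y}{m:02d}": str(y) followed by str(m) zero-padded to width 2 (exact: 02d = zfill 2)
def aFmtYM (y m : Int) : String :=
  String.ofList (PySem.Int.toChars y ++ PySem.Chars.zfill (PySem.Int.toChars m) 2)
-- A's monthly branch: flatten all YYYYMM periods, then join slices of 12
def aMonthBranch (start_year end_year : Int) : List String :=
  let all_periods : List String :=
    (PySem.List.pyRange start_year (end_year + 1) 1).foldl
      (fun acc y => (PySem.List.pyRange 1 13 1).foldl (fun acc2 m => acc2 ++ [aFmtYM y m]) acc) []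
  (PySem.List.pyRange 0 (all_periods.length : Int) 12).foldl
    (fun chunks i =>
      chunks ++ [PySem.Str.join "," (PySem.List.slice all_periods (some i) (some (i + 12)))]) []

-- A's yearly branch: join slices of 12 of the str(year) list
def aYearBranch (start_year end_year : Int) : List String :=
  let all_years : List String := (PySem.List.pyRange start_year (end_year + 1) 1).map PySem.Int.toStr
  (PySem.List.pyRange 0 (all_years.length : Int) 12).foldl
    (fun chunks i =>
      chunks ++ [PySem.Str.join "," (PySem.List.slice all_years (some i) (some (i + 12)))]) []

def chunk_period_py (period : String) (freq : String) : List String :=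
  let period := PySem.Str.strip period
  if PySem.Str.isIn "-" period = false then [period]
  else
    let parts := (PySem.Str.split? period "-").getD []  -- sep "-" ≠ "": split? is never none
    if parts.length ≠ 2 then [period]
    else
      -- parts[0], parts[1]: in range, guarded by the length check
      let start_str := PySem.Str.strip (parts.getD 0 "")
      let end_str := PySem.Str.strip (parts.getD 1 "")
      if !(PySem.Str.strIsdigit start_str) || !(PySem.Str.strIsdigit end_str) then [period]
      else
        -- guarded by isdigit (ASCII): int() never raises; getD 0 is unreachable
        let start_year := (PySem.Int.ofStr? start_str).getD 0
        let end_year := (PySem.Int.ofStr? end_str).getD 0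
        if start_year > end_year then [period]
        else if PySem.Str.upper freq == "M" then aMonthBranch start_year end_year
        else aYearBranch start_year end_year

-- ===== PORT B =====
-- f"{y}{m:02d}" as in Source B (exact: 02d = zfill 2)
def bFmtYM (y m : Int) : String :=
  String.ofList (PySem.Int.toChars y ++ PySem.Chars.zfill (PySem.Int.toChars m) 2)
-- while years: chunks.append(",".join(years[:12])); years = years[12:]
def chunkJoin (ys : List String) : List String :=
  if h : ys = [] then []
  else PySem.Str.join "," (ys.take 12) :: chunkJoin (ys.drop 12)
termination_by ys.length
decreasing_by
  have := List.length_pos_of_ne_nil h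
  simp [List.length_drop]; omega

-- one chunk per year: ",".join(f"{y}{m:02d}" for m in range(1,13))
def bMonthBranch (start_year end_year : Int) : List String :=
  (PySem.List.pyRange start_year (end_year + 1) 1).map
    (fun y => PySem.Str.join "," ((PySem.List.pyRange 1 13 1).map (fun m => bFmtYM y m)))

def bYearBranch (start_year end_year : Int) : List String :=
  chunkJoin ((PySem.List.pyRange start_year (end_year + 1) 1).map PySem.Int.toStr)

def chunk_period_py_alt (period : String) (freq : String) : List String :=
  let period := PySem.Str.strip period
  if PySem.Str.isIn "-" period = false then [period]
  else
    let parts := (PySem.Str.split? period "-").getD []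
    if parts.length ≠ 2 then [period]
    else
      let start_str := PySem.Str.strip (parts.getD 0 "")
      let end_str := PySem.Str.strip (parts.getD 1 "")
      if !(PySem.Str.strIsdigit start_str) || !(PySem.Str.strIsdigit end_str) then [period]
      else
        let start_year := (PySem.Int.ofStr? start_str).getD 0
        let end_year := (PySem.Int.ofStr? end_str).getD 0
        if start_year > end_year then [period]
        else if PySem.Str.upper freq == "M" then bMonthBranch start_year end_year
        else bYearBranch start_year end_year

-- ===== PRECONDITION & SPEC =====
def Spec_chunk_period_py (period : String) (freq : String) (out : List String) : Prop := out = chunk_period_py_alt period freq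
instance (period : String) (freq : String) (out : List String) : Decidable (Spec_chunk_period_py period freq out) := by unfold Spec_chunk_period_py; infer_instance

-- ===== CLAIM (what is proved, stated in full; the proofs are below) =====
def Claim_equal_chunk_period_py : Prop := ∀ (period : String) (freq : String), Dom_chunk_period_py period freq → Spec_chunk_period_py period freq (chunk_period_py period freq)

-- ===== LEMMAS AND PROOFS =====

lemma pyRange12_cons (n : Int) (h : 0 < n) :
    PySem.List.pyRange 0 n 12 = 0 :: (PySem.List.pyRange 0 (n - 12) 12).map (· + 12) := by
  rw [PySem.List.pyRange_of_pos _ _ (by norm_num), PySem.List.pyRange_of_pos _ _ (by norm_num)]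
  rw [if_pos h]
  by_cases h12 : (0 : Int) < n - 12
  · rw [if_pos h12]
    have hc : ((n - 0 + 12 - 1) / 12).toNat = ((n - 12 - 0 + 12 - 1) / 12).toNat + 1 := by omega
    rw [hc, List.range_succ_eq_map, List.map_cons, List.map_map]
    congr 1
    rw [List.map_map]
    apply List.map_congr_left
    intro k hk
    simp only [Function.comp_apply]
    push_cast
    ring
  · rw [if_neg h12]
    have hc : ((n - 0 + 12 - 1) / 12).toNat = 1 := by omega
    rw [hc, List.range_one]
    simp

lemma slice_take (l : List String) :
    PySem.List.slice l (some 0) (some 12) = l.take 12 := by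
  rw [show ((0:Int)) = ((0:Nat):Int) by norm_num, show ((12:Int)) = ((12:Nat):Int) by norm_num,
    PySem.List.slice_natCast]
  simp

lemma slice_shift (l : List String) (i : Int) (hi : 0 ≤ i) :
    PySem.List.slice l (some (i + 12)) (some (i + 12 + 12)) =
      PySem.List.slice (l.drop 12) (some i) (some (i + 12)) := by
  rw [PySem.List.slice_toNat _ (by omega) (by omega), PySem.List.slice_toNat _ hi (by omega)]
  rw [List.drop_drop]
  congr 1
  · omega
  · congr 1; omega

lemma mem_pyRange12_nonneg (m i : Int) (h : i ∈ PySem.List.pyRange 0 m 12) : 0 ≤ i := by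
  rw [PySem.List.pyRange_of_pos _ _ (by norm_num : (0:Int) < 12)] at h
  obtain ⟨k, _, hk⟩ := List.mem_map.mp h
  omega

-- A's slice-chunking loop computes B's take/drop recursion, for any list
lemma chunkFold_eq (l : List String) :
    (PySem.List.pyRange 0 (l.length : Int) 12).foldl
      (fun chunks i =>
        chunks ++ [PySem.Str.join "," (PySem.List.slice l (some i) (some (i + 12)))]) [] =
    chunkJoin l := by
  rw [PySem.List.foldl_append_singleton_eq_map, List.nil_append]
  induction hn : l.length using Nat.strong_induction_on generalizing l with
  | _ n ih =>
    subst hn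
    by_cases hl : l = []
    · subst hl
      rw [show ((([]:List String).length:Int)) = 0 by norm_num,
        PySem.List.pyRange_of_pos _ _ (by norm_num : (0:Int) < 12)]
      simp [chunkJoin]
    · have hpos : 0 < (l.length : Int) := by
        have := List.length_pos_of_ne_nil hl; omega
      rw [pyRange12_cons _ hpos, List.map_cons, List.map_map]
      rw [chunkJoin, dif_neg hl]
      congr 1
      · rw [show ((0:Int) + 12) = 12 by norm_num, slice_take]
      · have hcong : ∀ i ∈ PySem.List.pyRange 0 ((l.length : Int) - 12) 12,
            ((fun i => PySem.Str.join "," (PySem.List.slice l (some i) (some (i + 12)))) ∘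
              (· + 12)) i =
            PySem.Str.join "," (PySem.List.slice (l.drop 12) (some i) (some (i + 12))) := by
          intro i hi
          have h0 : 0 ≤ i := mem_pyRange12_nonneg _ _ hi
          simp only [Function.comp]
          rw [slice_shift l i h0]
        rw [List.map_congr_left hcong]
        have hlen : ((l.drop 12).length : Int) = (l.length : Int) - 12 ∨ (l.drop 12) = [] := by
          by_cases h12 : 12 ≤ l.length
          · left; simp [List.length_drop]; omega
          · right; apply List.drop_eq_nil_of_le; omega
        rcases hlen with hlen | hlen
        · rw [← hlen]
          exact ih (l.drop 12).length (by simp [List.length_drop]; omega) _ rfl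
        · rw [hlen]
          have : (l.length : Int) - 12 ≤ 0 := by
            have : l.drop 12 = [] := hlen
            have := List.drop_eq_nil_iff.mp this
            omega
          rw [PySem.List.pyRange_of_pos _ _ (by norm_num : (0:Int) < 12)]
          simp only [if_neg (by omega : ¬ (0:Int) < (l.length : Int) - 12)]
          simp [chunkJoin]

-- take/drop chunking of a flat list of 12-blocks returns one chunk per block
lemma chunkJoin_flatten (bs : List (List String)) (h : ∀ b ∈ bs, b.length = 12) :
    chunkJoin bs.flatten = bs.map (PySem.Str.join ",") := by
  induction bs with
  | nil => simp [chunkJoin]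
  | cons b rest ih =>
    have hb : b.length = 12 := h b (List.mem_cons_self ..)
    have hbne : b ++ rest.flatten ≠ [] := by
      intro hc; apply_fun List.length at hc; simp [hb] at hc
    rw [List.flatten_cons, chunkJoin, dif_neg hbne]
    rw [show (12 : Nat) = b.length from hb.symm, List.take_left, List.drop_left]
    rw [ih (fun x hx => h x (List.mem_cons_of_mem _ hx))]
    simp

lemma monthBranch_eq (s e : Int) : aMonthBranch s e = bMonthBranch s e := by
  unfold aMonthBranch bMonthBranch
  have hflat : (PySem.List.pyRange s (e + 1) 1).foldl
      (fun acc y => (PySem.List.pyRange 1 13 1).foldl (fun acc2 m => acc2 ++ [aFmtYM y m]) acc) [] =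
      ((PySem.List.pyRange s (e + 1) 1).map
        (fun y => (PySem.List.pyRange 1 13 1).map (fun m => bFmtYM y m))).flatten := by
    rw [PySem.List.foldl_congr_mem _ _ _ _ (fun acc y _ => PySem.List.foldl_append_singleton_eq_map _ _ acc)]
    rw [PySem.List.foldl_append_eq_flatMap, List.nil_append, List.flatMap_def]
    rfl
  simp only [hflat]
  rw [chunkFold_eq]
  rw [chunkJoin_flatten]
  · simp
  · intro b hb
    obtain ⟨y, _, hy⟩ := List.mem_map.mp hb
    rw [← hy]
    simp [PySem.List.length_pyRange_one]

lemma yearBranch_eq (s e : Int) : aYearBranch s e = bYearBranch s e := by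
  unfold aYearBranch bYearBranch
  exact chunkFold_eq _

-- ===== VERDICT (by name: the statement is the Claim_ definition above) =====
theorem chunk_period_py_spec : Claim_equal_chunk_period_py := by
  intro period freq _
  unfold Spec_chunk_period_py chunk_period_py chunk_period_py_alt
  rw [funext fun s => funext fun e => monthBranch_eq s e,
      funext fun s => funext fun e => yearBranch_eq s e]
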